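-- pv_equiv track=rewrite | github.com/daniel-reich/ubiquitous-fiesta | 6vSZmN66xhMRDX8YT_19.py | advanced_sort
-- ===== SOURCE A (Python) =====
-- def advanced_sort(lst):
--   unique = []
--   sort = []
--   for item in lst:
--     section = []
--     if item not in unique:
--       for x in range(lst.count(item)):
--         section.append(item)
--       sort.append(section)
--       unique.append(item)
--   return sort
-- ===== SOURCE B (Python) =====
-- def advanced_sort(lst):
--   counts = {}
--   for item in lst:
--     counts[item] = counts.get(item, 0) + 1
--   return [[k] * c for k, c in counts.items()]
-- ===== Notes on version B (the rewrite author's own statement) =====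
-- stated objective: faster
-- what changed: Replaces the quadratic membership scan plus repeated lst.count/range loops by a single counting pass over an insertion-ordered dict, then builds each group with list repetition.
import Mathlib
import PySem

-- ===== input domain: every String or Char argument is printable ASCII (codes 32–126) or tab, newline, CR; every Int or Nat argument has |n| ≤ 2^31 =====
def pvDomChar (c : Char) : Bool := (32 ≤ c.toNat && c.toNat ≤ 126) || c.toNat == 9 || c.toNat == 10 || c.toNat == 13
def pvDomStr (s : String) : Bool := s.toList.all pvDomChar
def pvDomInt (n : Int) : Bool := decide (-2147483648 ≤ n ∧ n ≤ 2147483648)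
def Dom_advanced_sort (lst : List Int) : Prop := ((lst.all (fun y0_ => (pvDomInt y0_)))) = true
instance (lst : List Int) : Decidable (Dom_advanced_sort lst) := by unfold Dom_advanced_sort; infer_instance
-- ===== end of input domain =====

-- B replaces A's quadratic membership-scan-plus-recount loop by one counting pass
-- over an insertion-ordered dict (objective: faster, asymptotically).

-- ===== PORT A =====
def advanced_sort (lst : List Int) : List (List Int) :=
  (lst.foldl
    (fun (st : List Int × List (List Int)) item =>
      if item ∉ st.1 then
        let section_ :=
          (PySem.List.pyRange 0 (PySem.List.count lst item) 1).foldl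
            (fun sec _ => sec ++ [item]) []
        (st.1 ++ [item], st.2 ++ [section_])
      else st)
    ([], [])).2

-- ===== PORT B =====
def advanced_sort_alt (lst : List Int) : List (List Int) :=
  let counts :=
    lst.foldl (fun (d : PySem.Dict Int Int) item => d.insert item (d.getD item 0 + 1))
      PySem.Dict.empty
  counts.items.map (fun p => List.replicate p.2.toNat p.1)

-- ===== PRECONDITION & SPEC =====
def Spec_advanced_sort (lst : List Int) (out : List (List Int)) : Prop := out = advanced_sort_alt lst
instance (lst : List Int) (out : List (List Int)) : Decidable (Spec_advanced_sort lst out) := by unfold Spec_advanced_sort; infer_instance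

-- ===== CLAIM (what is proved, stated in full; the proofs are below) =====
def Claim_equal_advanced_sort : Prop := ∀ (lst : List Int), Dom_advanced_sort lst → Spec_advanced_sort lst (advanced_sort lst)

-- ===== LEMMAS AND PROOFS =====

-- `unique` is always a prefix of what Set.update makes of it
theorem pv_update_prefix (l : List Int) : ∀ (u : List Int), ∃ t, PySem.Set.update u l = u ++ t := by
  induction l with
  | nil => intro u; exact ⟨[], by simp [PySem.Set.update]⟩
  | cons x l ih =>
    intro u
    by_cases hx : x ∈ u
    · obtain ⟨t, ht⟩ := ih u
      exact ⟨t, by simpa [PySem.Set.update, PySem.Set.add, hx] using ht⟩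
    · obtain ⟨t, ht⟩ := ih (u ++ [x])
      refine ⟨x :: t, ?_⟩
      simp [PySem.Set.update, PySem.Set.add, hx] at ht ⊢
      simpa using ht

-- characterisation of A's loop: second component is the sections of the newly seen items
theorem pv_loopA (g : Int → List Int) :
    ∀ (l u : List Int) (s : List (List Int)),
      l.foldl
        (fun (st : List Int × List (List Int)) item =>
          if item ∉ st.1 then (st.1 ++ [item], st.2 ++ [g item]) else st)
        (u, s)
      = (PySem.Set.update u l, s ++ ((PySem.Set.update u l).drop u.length).map g) := by
  intro l
  induction l with
  | nil => intro u s; simp [PySem.Set.update]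
  | cons x l ih =>
    intro u s
    simp only [List.foldl_cons]
    by_cases hx : x ∈ u
    · have hupd : PySem.Set.update u (x :: l) = PySem.Set.update u l := by
        simp [PySem.Set.update, PySem.Set.add, hx]
      rw [if_neg (by simpa using hx), ih u s, hupd]
    · have hupd : PySem.Set.update u (x :: l) = PySem.Set.update (u ++ [x]) l := by
        simp [PySem.Set.update, PySem.Set.add, hx]
      rw [if_pos (by simpa using hx), ih (u ++ [x]) (s ++ [g x])]
      obtain ⟨t, ht⟩ := pv_update_prefix l (u ++ [x])
      rw [hupd, ht]
      simp [List.drop_append]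

-- A's section loop builds the replicate of the count
theorem pv_section (lst : List Int) (item : Int) :
    (PySem.List.pyRange 0 (PySem.List.count lst item) 1).foldl
      (fun sec _ => sec ++ [item]) []
    = List.replicate (lst.count item) item := by
  rw [PySem.List.foldl_append_singleton_eq_map (f := fun _ => item)]
  simp [List.map_const', PySem.List.length_pyRange_one, PySem.List.count_eq]

-- ===== VERDICT (by name: the statement is the Claim_ definition above) =====
theorem advanced_sort_spec : Claim_equal_advanced_sort := by
  intro lst _
  unfold Spec_advanced_sort advanced_sort advanced_sort_alt
  simp only [PySem.Dict.foldl_insert_getD_add_one_eq_counter, PySem.Dict.items_counter]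
  have hA := pv_loopA (fun item =>
      (PySem.List.pyRange 0 (PySem.List.count lst item) 1).foldl
        (fun sec _ => sec ++ [item]) []) lst [] []
  rw [hA]
  simp only [List.nil_append, List.map_map]
  have hofl : PySem.Set.update ([] : List Int) lst = PySem.Set.ofList lst := rfl
  rw [hofl]
  refine (List.map_congr_left ?_).symm
  intro k _
  rw [Function.comp_apply, pv_section]
  simp
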